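-- pv_equiv track=rewrite | github.com/MarvelMathesh/SkinLesion-Xception | diagnostic_report_generator.py | format_ai_analysis
-- ===== SOURCE A (Python) =====
-- def format_ai_analysis(analysis_text: str) -> list:
--     """Parse and structure AI analysis text into organized sections."""
--     if not analysis_text or "AI Analysis Error" in analysis_text:
--         return []
--
--     # Split into logical sections based on common medical report structure
--     sections = []
--
--     # Look for numbered sections or bullet points
--     if "1." in analysis_text or "•" in analysis_text:
--         # Split by numbered sections or bullets
--         parts = analysis_text.replace("**", "").split("\n")
--         current_section = ""
--
--         for part in parts:
--             part = part.strip()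
--             if part and (part[0].isdigit() or part.startswith("•") or part.startswith("-")):
--                 if current_section:
--                     sections.append(current_section)
--                 current_section = part
--             elif part:
--                 current_section += " " + part
--
--         if current_section:
--             sections.append(current_section)
--     else:
--         # Split by paragraphs
--         paragraphs = analysis_text.split('\n\n')
--         for paragraph in paragraphs:
--             if paragraph.strip():
--                 # Clean up formatting
--                 cleaned = paragraph.replace("**", "").strip()
--                 sections.append(cleaned)
--
--     return sections[:5]  # Limit to 5 sections for readability
-- ===== SOURCE B (Python) =====
-- def _is_header(line):
--     return line[0].isdigit() or line[0] in "\u2022-"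
--
--
-- def _run_len(lines):
--     """Length of the leading run of non-header lines."""
--     i = 0
--     while i < len(lines) and not _is_header(lines[i]):
--         i += 1
--     return i
--
--
-- def _chunks(lines):
--     """lines starts with a header: group each header with its following non-header lines."""
--     if not lines:
--         return []
--     k = _run_len(lines[1:])
--     return [" ".join(lines[:k + 1])] + _chunks(lines[k + 1:])
--
--
-- def format_ai_analysis(analysis_text: str) -> list:
--     """Parse and structure AI analysis text into organized sections."""
--     if not analysis_text or "AI Analysis Error" in analysis_text:
--         return []
--
--     if "1." in analysis_text or "\u2022" in analysis_text:
--         lines = [p for p in (ln.strip() for ln in analysis_text.replace("**", "").split("\n")) if p]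
--         k = _run_len(lines)
--         intro = [" ".join(lines[:k])] if k else []
--         sections = intro + _chunks(lines[k:])
--     else:
--         sections = [p.replace("**", "").strip() for p in analysis_text.split('\n\n') if p.strip()]
--
--     return sections[:5]
-- ===== Notes on version B (the rewrite author's own statement) =====
-- stated objective: alternative
-- what changed: Replaces A's single running-accumulator loop (current_section built line by line with flush-on-header) by a two-phase decomposition: strip and filter the lines once up front, then recursively slice the line list into header-to-header runs and space-join each run.
-- intended difference: On non-empty, error-free texts that take the numbered/bullet branch but whose first non-blank line does not begin with a digit, a bullet or a dash, A returns that leading intro section with a spurious leading space (an artifact of appending a space-prefixed part to the empty accumulator), while B returns the same section without the space, the intended clean text. — e.g. on format_ai_analysis("x\n1. a"): A returns [" x", "1. a"], B returns ["x", "1. a"]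
import Mathlib
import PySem

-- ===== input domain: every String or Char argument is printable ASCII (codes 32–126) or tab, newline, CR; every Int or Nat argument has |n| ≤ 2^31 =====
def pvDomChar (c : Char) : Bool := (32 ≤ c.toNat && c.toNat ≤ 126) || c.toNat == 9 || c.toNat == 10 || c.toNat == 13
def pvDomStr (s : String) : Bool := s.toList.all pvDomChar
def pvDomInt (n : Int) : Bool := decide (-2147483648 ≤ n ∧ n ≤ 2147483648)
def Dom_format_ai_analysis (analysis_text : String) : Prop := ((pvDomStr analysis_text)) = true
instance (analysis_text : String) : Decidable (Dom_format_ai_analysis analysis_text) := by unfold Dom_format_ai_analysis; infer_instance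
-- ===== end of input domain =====

-- B replaces A's running-accumulator loop by a two-phase run-splitting recursion
-- (strip/filter the lines once, then chunk header-to-header windows and join them);
-- objective: alternative decomposition, same cost. Intended difference D_ below:
-- B does not reproduce A's spurious leading space on a pre-header intro section.

-- ===== PORT A =====
-- one iteration of A's 'for part in parts' loop; state = (sections, current_section)
def faStep (st : List (List Char) × List Char) (part : List Char) : List (List Char) × List Char :=
  match PySem.Chars.strip part with
  | [] => st
  | c :: rest =>
    if PySem.Chars.isdigit c || PySem.Chars.startswith (c :: rest) ['•']
        || PySem.Chars.startswith (c :: rest) ['-'] then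
      ((if st.2 ≠ [] then st.1 ++ [st.2] else st.1), c :: rest)
    else
      (st.1, st.2 ++ ' ' :: (c :: rest))

def format_ai_analysis (analysis_text : String) : List String :=
  if PySem.Str.len analysis_text == 0 || PySem.Str.isIn "AI Analysis Error" analysis_text then
    []
  else
    let cs := analysis_text.toList
    let sections : List (List Char) :=
      if PySem.Chars.isIn "1.".toList cs || PySem.Chars.isIn ['•'] cs then
        let parts := PySem.Chars.splitOn (PySem.Chars.replace cs "**".toList []) ['\n']
        let st := parts.foldl faStep ([], [])
        if st.2 ≠ [] then st.1 ++ [st.2] else st.1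
      else
        let paragraphs := PySem.Chars.splitOn cs ['\n', '\n']
        paragraphs.foldl (fun secs p =>
          if !(PySem.Chars.strip p).isEmpty then
            secs ++ [PySem.Chars.strip (PySem.Chars.replace p "**".toList [])]
          else secs) []
    (PySem.List.slice sections none (some 5)).map String.ofList

-- ===== PORT B =====
def fbIsHeader (line : List Char) : Bool :=
  match line with
  | [] => false
  | c :: _ => PySem.Chars.isdigit c || c == '•' || c == '-'

-- length of the leading run of non-header lines (B's _run_len while-scan)
def fbRunLen (lines : List (List Char)) : Nat :=
  match lines with
  | [] => 0
  | l :: t => if fbIsHeader l then 0 else fbRunLen t + 1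

-- B's _chunks: group each header line with its following non-header lines
-- fuel (initially the list length) makes the header-to-header recursion structural
def fbChunksGo : Nat → List (List Char) → List (List Char)
  | _, [] => []
  | 0, _ :: _ => []
  | f + 1, h :: rest =>
    let k := fbRunLen rest
    PySem.Chars.join [' '] (h :: rest.take k) :: fbChunksGo f (rest.drop k)

def fbChunks (lines : List (List Char)) : List (List Char) :=
  fbChunksGo lines.length lines

def format_ai_analysis_alt (analysis_text : String) : List String :=
  if PySem.Str.len analysis_text == 0 || PySem.Str.isIn "AI Analysis Error" analysis_text then
    []
  else
    let cs := analysis_text.toList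
    let sections : List (List Char) :=
      if PySem.Chars.isIn "1.".toList cs || PySem.Chars.isIn ['•'] cs then
        let lines := ((PySem.Chars.splitOn (PySem.Chars.replace cs "**".toList []) ['\n']).map
          PySem.Chars.strip).filter (fun p => !p.isEmpty)
        let k := fbRunLen lines
        let intro := if k ≠ 0 then [PySem.Chars.join [' '] (lines.take k)] else []
        intro ++ fbChunks (lines.drop k)
      else
        ((PySem.Chars.splitOn cs ['\n', '\n']).filter (fun p => !(PySem.Chars.strip p).isEmpty)).map
          (fun p => PySem.Chars.strip (PySem.Chars.replace p "**".toList []))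
    (PySem.List.slice sections none (some 5)).map String.ofList

-- ===== PRECONDITION & SPEC =====
-- the first line of the **-removed text whose stripped content is non-empty (for stating D_ only)
def dFirstLine (cs : List Char) : Option (List Char) :=
  (PySem.Chars.splitOn (PySem.Chars.replace cs "**".toList []) ['\n']).findSome?
    (fun ln => if PySem.Chars.strip ln = [] then none else some (PySem.Chars.strip ln))

-- On non-empty, error-free texts that take the numbered/bullet branch but whose first
-- non-blank line does not begin with a digit, a bullet or a dash, A returns that leading
-- intro section with a spurious leading space (an artifact of appending a space-prefixed
-- part to the empty accumulator); B returns it without the space, the intended clean text.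
def D_format_ai_analysis (analysis_text : String) : Prop :=
  ¬(PySem.Str.len analysis_text == 0 || PySem.Str.isIn "AI Analysis Error" analysis_text) = true ∧
  (PySem.Chars.isIn "1.".toList analysis_text.toList ||
    PySem.Chars.isIn ['•'] analysis_text.toList) = true ∧
  (dFirstLine analysis_text.toList).any
    (fun l => (l.take 1).all
      (fun c => !(decide ('0' ≤ c ∧ c ≤ '9') || c == '•' || c == '-'))) = true
instance (analysis_text : String) : Decidable (D_format_ai_analysis analysis_text) := by
  unfold D_format_ai_analysis; infer_instance

def Spec_format_ai_analysis (analysis_text : String) (out : List String) : Prop :=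
  ¬ D_format_ai_analysis analysis_text → out = format_ai_analysis_alt analysis_text
instance (analysis_text : String) (out : List String) : Decidable (Spec_format_ai_analysis analysis_text out) := by
  unfold Spec_format_ai_analysis; infer_instance

def pvDiffWitness_format_ai_analysis : String := "x\n1. a"
def pvDiffWitnessOut_format_ai_analysis : (List String) × (List String) :=
  ([" x", "1. a"], ["x", "1. a"])

-- ===== CLAIM (what is proved, stated in full; the proofs are below) =====
def Claim_unchanged_format_ai_analysis : Prop := ∀ (analysis_text : String),
  Dom_format_ai_analysis analysis_text → Spec_format_ai_analysis analysis_text (format_ai_analysis analysis_text)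
def Claim_changed_format_ai_analysis : Prop :=
  Dom_format_ai_analysis (pvDiffWitness_format_ai_analysis) ∧
  D_format_ai_analysis (pvDiffWitness_format_ai_analysis) ∧
  format_ai_analysis (pvDiffWitness_format_ai_analysis) = pvDiffWitnessOut_format_ai_analysis.1 ∧
  format_ai_analysis_alt (pvDiffWitness_format_ai_analysis) = pvDiffWitnessOut_format_ai_analysis.2 ∧
  pvDiffWitnessOut_format_ai_analysis.1 ≠ pvDiffWitnessOut_format_ai_analysis.2
def Claim_exact_format_ai_analysis : Prop := ∀ (analysis_text : String),
  Dom_format_ai_analysis analysis_text → D_format_ai_analysis analysis_text →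
  format_ai_analysis analysis_text ≠ format_ai_analysis_alt analysis_text

-- ===== LEMMAS AND PROOFS =====

-- A's flush-at-end of the loop state, as a recursion over the stripped nonempty lines
def faSecs (cur : List Char) (ls : List (List Char)) : List (List Char) :=
  match ls with
  | [] => if cur ≠ [] then [cur] else []
  | p :: t =>
    if fbIsHeader p then (if cur ≠ [] then cur :: faSecs p t else faSecs p t)
    else faSecs (cur ++ ' ' :: p) t

theorem fbChunks_nil : fbChunks [] = [] := rfl

theorem fbChunksGo_congr : ∀ (f g : Nat) (ls : List (List Char)),
    ls.length ≤ f → ls.length ≤ g → fbChunksGo f ls = fbChunksGo g ls := by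
  intro f
  induction f with
  | zero =>
    intro g ls hf _
    cases ls with
    | nil => cases g <;> rfl
    | cons h t => simp at hf
  | succ f ih =>
    intro g ls hf hg
    cases ls with
    | nil => cases g <;> rfl
    | cons h rest =>
      cases g with
      | zero => simp at hg
      | succ g =>
        simp only [fbChunksGo]
        have hlen : (rest.drop (fbRunLen rest)).length ≤ rest.length := by
          simp
        simp only [List.length_cons, Nat.add_le_add_iff_right] at hf hg
        rw [ih g _ (le_trans hlen hf) (le_trans hlen hg)]

theorem fbChunks_cons (h : List Char) (rest : List (List Char)) :
    fbChunks (h :: rest) =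
      PySem.Chars.join [' '] (h :: rest.take (fbRunLen rest)) :: fbChunks (rest.drop (fbRunLen rest)) := by
  unfold fbChunks
  simp only [List.length_cons, fbChunksGo]
  rw [fbChunksGo_congr rest.length (rest.drop (fbRunLen rest)).length _ (by simp) le_rfl]

-- A's header test on a nonempty stripped line equals B's
theorem hd_eq (c : Char) (t : List Char) :
    (PySem.Chars.isdigit c || PySem.Chars.startswith (c :: t) ['•']
      || PySem.Chars.startswith (c :: t) ['-']) = fbIsHeader (c :: t) := by
  simp [PySem.Chars.startswith, fbIsHeader, List.isPrefixOf, Bool.or_comm,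
    BEq.comm]

theorem fa_fold (parts : List (List Char)) :
    ∀ (secs : List (List Char)) (cur : List Char),
    (if (parts.foldl faStep (secs, cur)).2 ≠ [] then
        (parts.foldl faStep (secs, cur)).1 ++ [(parts.foldl faStep (secs, cur)).2]
      else (parts.foldl faStep (secs, cur)).1) =
    secs ++ faSecs cur ((parts.map PySem.Chars.strip).filter (fun p => !p.isEmpty)) := by
  induction parts with
  | nil =>
    intro secs cur
    by_cases hc : cur = [] <;> simp [faSecs, hc]
  | cons part rest ih =>
    intro secs cur
    simp only [List.foldl_cons, List.map_cons]
    rcases h : PySem.Chars.strip part with _ | ⟨c, t⟩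
    · simpa [faStep, h] using ih secs cur
    · simp only [faStep, h, hd_eq, List.filter_cons, List.isEmpty_cons, Bool.not_false]
      by_cases hh : fbIsHeader (c :: t)
      · by_cases hc : cur = []
        · simp [hh, hc, faSecs, ih]
        · simp [hh, hc, faSecs, ih, List.append_assoc]
      · simp [hh, faSecs, ih]

theorem join_append_cons (a b : List Char) (xs : List (List Char)) :
    PySem.Chars.join [' '] ((a ++ b) :: xs) = a ++ PySem.Chars.join [' '] (b :: xs) := by
  cases xs with
  | nil => simp [PySem.Chars.join_singleton]
  | cons y ys => simp [PySem.Chars.join_cons_cons, List.append_assoc]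

theorem fbIsHeader_ne_nil {p : List Char} (h : fbIsHeader p = true) : p ≠ [] := by
  cases p <;> simp [fbIsHeader] at h ⊢

theorem faSecs_chunks (ls : List (List Char)) :
    ∀ (cur : List Char), cur ≠ [] → faSecs cur ls = fbChunks (cur :: ls) := by
  induction ls with
  | nil =>
    intro cur hc
    simp [faSecs, hc, fbChunks_cons, fbChunks_nil, fbRunLen, PySem.Chars.join_singleton]
  | cons p t ih =>
    intro cur hc
    by_cases hh : fbIsHeader p
    · rw [fbChunks_cons]
      have h0 : fbRunLen (p :: t) = 0 := by simp [fbRunLen, hh]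
      rw [h0]
      simp [faSecs, hh, hc, ih p (fbIsHeader_ne_nil hh), PySem.Chars.join_singleton]
    · have h1 : faSecs cur (p :: t) = faSecs (cur ++ ' ' :: p) t := by simp [faSecs, hh]
      have h0 : fbRunLen (p :: t) = fbRunLen t + 1 := by simp [fbRunLen, hh]
      rw [h1, ih _ (by simp), fbChunks_cons, fbChunks_cons, h0]
      simp only [List.take_succ_cons, List.drop_succ_cons]
      rw [join_append_cons cur (' ' :: p), show (' ' :: p) = [' '] ++ p from rfl,
        join_append_cons [' '] p, PySem.Chars.join_cons_cons]
      simp [List.append_assoc]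

theorem faSecs_top (ls : List (List Char)) :
    faSecs [] ls =
      (if fbRunLen ls ≠ 0 then [' ' :: PySem.Chars.join [' '] (ls.take (fbRunLen ls))] else [])
        ++ fbChunks (ls.drop (fbRunLen ls)) := by
  cases ls with
  | nil => simp [faSecs, fbRunLen, fbChunks_nil]
  | cons p t =>
    by_cases hh : fbIsHeader p
    · have h0 : fbRunLen (p :: t) = 0 := by simp [fbRunLen, hh]
      have h1 : faSecs [] (p :: t) = faSecs p t := by simp [faSecs, hh]
      rw [h1, faSecs_chunks t p (fbIsHeader_ne_nil hh), h0]
      simp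
    · have h0 : fbRunLen (p :: t) = fbRunLen t + 1 := by simp [fbRunLen, hh]
      have h1 : faSecs [] (p :: t) = faSecs (' ' :: p) t := by simp [faSecs, hh]
      rw [h1, faSecs_chunks t (' ' :: p) (by simp), fbChunks_cons, h0]
      simp only [List.take_succ_cons, List.drop_succ_cons, ne_eq, Nat.succ_ne_zero,
        not_false_eq_true, if_pos]
      rw [show (' ' :: p) = [' '] ++ p from rfl, join_append_cons [' '] p]
      rfl

-- the first-content-line scan equals head? of the stripped/filtered line list
theorem findSome?_head (ps : List (List Char)) :
    ps.findSome? (fun ln => if PySem.Chars.strip ln = [] then none else some (PySem.Chars.strip ln)) =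
      ((ps.map PySem.Chars.strip).filter (fun p => !p.isEmpty)).head? := by
  induction ps with
  | nil => rfl
  | cons p t ih =>
    by_cases hp : PySem.Chars.strip p = []
    · simp [hp, ih]
    · simp [hp]

theorem dFirstNonHeader_iff (ls : List (List Char)) :
    ls.head?.any
      (fun l => (l.take 1).all
        (fun c => !(decide ('0' ≤ c ∧ c ≤ '9') || c == '•' || c == '-'))) = true ↔
      fbRunLen ls ≠ 0 := by
  cases ls with
  | nil => simp [fbRunLen]
  | cons l t =>
    cases l with
    | nil => simp [fbRunLen, fbIsHeader]
    | cons c r =>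
      simp [fbRunLen, fbIsHeader, PySem.Chars.isdigit]
      constructor
      · rintro ⟨⟨hd, h2⟩, h3⟩
        refine ⟨fun h0 => ?_, h2, h3⟩
        rcases hd with hd | hd
        · exact absurd h0 (not_le.mpr hd)
        · exact hd
      · rintro ⟨h, h2, h3⟩
        refine ⟨⟨?_, h2⟩, h3⟩
        by_cases h0 : '0' ≤ c
        · exact Or.inr (h h0)
        · exact Or.inl (not_le.mp h0)

-- ===== VERDICT (by name: the statement is the Claim_ definition above) =====
theorem format_ai_analysis_spec : Claim_unchanged_format_ai_analysis := by
  intro s _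
  unfold Spec_format_ai_analysis
  intro hD2
  unfold format_ai_analysis format_ai_analysis_alt
  by_cases h1 : (PySem.Str.len s == 0 || PySem.Str.isIn "AI Analysis Error" s) = true
  · rw [if_pos h1, if_pos h1]
  · simp only [h1]
    by_cases h2 : (PySem.Chars.isIn "1.".toList s.toList || PySem.Chars.isIn ['•'] s.toList) = true
    · simp only [h2, if_true]
      have h3 : ¬((dFirstLine s.toList).any
          (fun l => (l.take 1).all
            (fun c => !(decide ('0' ≤ c ∧ c ≤ '9') || c == '•' || c == '-'))) = true) := by
        intro hc
        exact hD2 ⟨h1, h2, hc⟩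
      have hk : fbRunLen (((PySem.Chars.splitOn (PySem.Chars.replace s.toList "**".toList [])
          ['\n']).map PySem.Chars.strip).filter (fun p => !p.isEmpty)) = 0 := by
        by_contra hk
        refine h3 ?_
        rw [dFirstLine, findSome?_head]
        exact (dFirstNonHeader_iff _).mpr hk
      rw [fa_fold, faSecs_top]
      simp only [hk]
      simp
    · simp only [h2]
      rw [PySem.List.foldl_append_if (fun p => !(PySem.Chars.strip p).isEmpty)
        (fun p => PySem.Chars.strip (PySem.Chars.replace p "**".toList []))]
      simp

theorem format_ai_analysis_changed : Claim_changed_format_ai_analysis := by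
  unfold Claim_changed_format_ai_analysis; decide

theorem format_ai_analysis_tight : Claim_exact_format_ai_analysis := by
  intro s _ hD
  obtain ⟨h1, h2, h3⟩ := hD
  have hk : fbRunLen (((PySem.Chars.splitOn (PySem.Chars.replace s.toList "**".toList [])
      ['\n']).map PySem.Chars.strip).filter (fun p => !p.isEmpty)) ≠ 0 := by
    rw [dFirstLine, findSome?_head] at h3
    exact (dFirstNonHeader_iff _).mp h3
  unfold format_ai_analysis format_ai_analysis_alt
  simp only [h1, h2, if_true]
  rw [fa_fold, faSecs_top]
  simp only [hk, ne_eq, not_false_eq_true, if_pos, List.nil_append]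
  rw [show (5 : Int) = ((5 : Nat) : Int) from rfl, PySem.List.slice_to_natCast,
    PySem.List.slice_to_natCast]
  simp only [Bool.false_eq_true, if_false, List.cons_append, List.take_succ_cons, List.map_cons,
    List.cons.injEq, not_and]
  intro hhd
  exfalso
  have hj := congrArg String.toList hhd
  simp at hj
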